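-- pv_equiv track=rewrite | github.com/MaximilianErfurt/KI_Praktikum | XMLVerarbeitung.py | compress_split_string
-- ===== SOURCE A (Python) =====
-- def compress_split_string(input_string):
--     # Wandele den String in Kleinbuchstaben um
--     input_string = input_string.lower()
--
--     compressed_strings = []
--     compressed_string = ""
--     count = 1
--     prev_char = ""
--
--     for char in input_string:
--         if char == prev_char:
--             count += 1
--         else:
--             # Überprüfe die Länge des komprimierten Strings vor dem Hinzufügen des neuen Zeichens
--             if len(compressed_string) + 2 + len(prev_char) > 50:
--                 # Füge den aktuellen Teil der komprimierten Zeichenkette zur Liste hinzu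
--                 compressed_strings.append(compressed_string)
--                 compressed_string = ""
--
--             # Füge das vorherige Zeichen und seine Anzahl zur komprimierten Zeichenkette hinzu
--             if prev_char:
--                 compressed_string += (str(count) if (count > 1 and not ((prev_char == 'w') or (prev_char == 'c'))) else (str(45 * count) if ((prev_char == 'w') or (prev_char == 'c')) else "")) + prev_char
--
--             # Setze die Anzahl und das vorherige Zeichen für das neue Zeichen zurück
--             count = 1
--             prev_char = char
--
--     # Füge das letzte Zeichen und seine Anzahl zur komprimierten Zeichenkette hinzu
--     if prev_char:
--         compressed_string += (str(count) if (count > 1 and not ((prev_char == 'w') or (prev_char == 'c'))) else (str(45 * count) if ((prev_char == 'w') or (prev_char == 'c')) else "")) + prev_char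
--
--     # Verarbeite den letzten Teil des komprimierten Strings
--     if compressed_string:
--         compressed_strings.append(compressed_string)
--
--     return compressed_strings
-- ===== SOURCE B (Python) =====
-- from itertools import groupby
--
-- def _token(char, count):
--     # same formatting as A: w/c always get 45*count digits, others digits only when count>1
--     if char == 'w' or char == 'c':
--         return str(45 * count) + char
--     return (str(count) if count > 1 else "") + char
--
-- def compress_split_string(input_string):
--     tokens = [_token(c, sum(1 for _ in g)) for c, g in groupby(input_string.lower())]
--     if not tokens:
--         return []
--     *init, last = tokens
--     chunks = []
--     cur = ""
--     for tok in init: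
--         if len(cur) > 47:
--             chunks.append(cur)
--             cur = ""
--         cur += tok
--     chunks.append(cur + last)
--     return chunks
-- ===== Notes on version B (the rewrite author's own statement) =====
-- stated objective: simpler
-- what changed: A's single character loop with four mutable state variables is replaced by two clear passes: collect runs with itertools.groupby, then format each run token and greedily pack tokens into chunks (the final token is appended without a flush check, exactly as A's post-loop code does).
import Mathlib
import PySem

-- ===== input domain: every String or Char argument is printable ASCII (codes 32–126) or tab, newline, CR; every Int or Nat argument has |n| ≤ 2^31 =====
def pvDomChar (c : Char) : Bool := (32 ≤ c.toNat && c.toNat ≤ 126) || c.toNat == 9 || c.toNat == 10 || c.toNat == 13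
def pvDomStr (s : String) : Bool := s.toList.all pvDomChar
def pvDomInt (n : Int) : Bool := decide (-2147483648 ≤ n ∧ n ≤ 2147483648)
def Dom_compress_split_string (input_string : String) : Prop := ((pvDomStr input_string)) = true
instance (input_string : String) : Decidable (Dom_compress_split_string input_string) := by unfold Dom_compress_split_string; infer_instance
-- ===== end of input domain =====

-- B rewrites A's single stateful character loop as two passes (collect runs, then format+pack tokens); same return value, objective: simpler decomposition.

-- ===== PORT A =====

-- token A appends for a finished run (its conditional expression, verbatim)
def pvTokA (prev_char : Char) (count : Int) : String :=
  (if count > 1 ∧ ¬ (prev_char = 'w' ∨ prev_char = 'c') then PySem.Int.toStr count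
   else if prev_char = 'w' ∨ prev_char = 'c' then PySem.Int.toStr (45 * count)
   else "") ++ String.singleton prev_char

-- A's loop body; prev_char "" is modelled as none
def pvStepA (st : List String × String × Int × Option Char) (char : Char) :
    List String × String × Int × Option Char :=
  match st with
  | (css, cs, count, prev) =>
    if prev = some char then (css, cs, count + 1, prev)
    else
      let prevLen : Nat := match prev with | some _ => 1 | none => 0
      let css' := if cs.length + 2 + prevLen > 50 then css ++ [cs] else css
      let cs' := if cs.length + 2 + prevLen > 50 then "" else cs
      let cs'' := match prev with | some p => cs' ++ pvTokA p count | none => cs'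
      (css', cs'', 1, some char)

def compress_split_string (input_string : String) : List String :=
  match ((PySem.Str.lower input_string).toList).foldl pvStepA ([], "", 1, none) with
  | (css, cs, count, prev) =>
    let cs' := match prev with | some p => cs ++ pvTokA p count | none => cs
    if cs' ≠ "" then css ++ [cs'] else css

-- ===== PORT B =====

-- itertools.groupby on a char list: list of (char, run length) pairs
def pvRunsAux (p : Char) (n : Int) : List Char → List (Char × Int)
  | [] => [(p, n)]
  | c :: l => if c = p then pvRunsAux p (n + 1) l else (p, n) :: pvRunsAux c 1 l

def pvRuns : List Char → List (Char × Int)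
  | [] => []
  | c :: l => pvRunsAux c 1 l

-- Source B's _token
def pvToken (c : Char) (n : Int) : String :=
  if c = 'w' ∨ c = 'c' then PySem.Int.toStr (45 * n) ++ String.singleton c
  else (if n > 1 then PySem.Int.toStr n else "") ++ String.singleton c

-- Source B's loop body over init tokens: flush a full chunk, then append the token
def pvPackStep (st : List String × String) (tok : String) : List String × String :=
  match st with
  | (chunks, cur) =>
    (if cur.length > 47 then chunks ++ [cur] else chunks,
     (if cur.length > 47 then "" else cur) ++ tok)

def compress_split_string_alt (input_string : String) : List String :=
  match (pvRuns (PySem.Str.lower input_string).toList).map (fun r => pvToken r.1 r.2) with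
  | [] => []
  | t :: ts =>
    let last := (t :: ts).getLastD ""
    let r := ((t :: ts).dropLast).foldl pvPackStep ([], "")
    r.1 ++ [r.2 ++ last]

-- ===== PRECONDITION & SPEC =====
def Spec_compress_split_string (input_string : String) (out : List String) : Prop := out = compress_split_string_alt input_string
instance (input_string : String) (out : List String) : Decidable (Spec_compress_split_string input_string out) := by unfold Spec_compress_split_string; infer_instance

-- ===== CLAIM (what is proved, stated in full; the proofs are below) =====
def Claim_equal_compress_split_string : Prop := ∀ (input_string : String), Dom_compress_split_string input_string → Spec_compress_split_string input_string (compress_split_string input_string)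

-- ===== LEMMAS AND PROOFS =====

-- recursive form of B's packing loop (proof helper)
def pvPackR (chunks : List String) (cur : String) : List String → List String
  | [] => chunks ++ [cur]
  | [t] => chunks ++ [cur ++ t]
  | t :: t' :: rest =>
      pvPackR (if cur.length > 47 then chunks ++ [cur] else chunks)
              ((if cur.length > 47 then "" else cur) ++ t) (t' :: rest)

-- A's post-loop finalization (proof helper)
def pvFinishA (st : List String × String × Int × Option Char) : List String :=
  match st with
  | (css, cs, count, prev) =>
    let cs' := match prev with | some p => cs ++ pvTokA p count | none => cs
    if cs' ≠ "" then css ++ [cs'] else css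

theorem pvTok_eq (p : Char) (n : Int) : pvTokA p n = pvToken p n := by
  unfold pvTokA pvToken
  by_cases hwc : p = 'w' ∨ p = 'c' <;> by_cases hn : n > 1 <;> simp [hwc, hn]

theorem pvToken_ne_empty (p : Char) (n : Int) : pvToken p n ≠ "" := by
  unfold pvToken
  split <;> (intro h; have := congrArg String.length h; simp at this)

theorem pvRunsAux_ne_nil (l : List Char) (p : Char) (n : Int) : pvRunsAux p n l ≠ [] := by
  induction l generalizing p n with
  | nil => simp [pvRunsAux]
  | cons c l ih =>
    unfold pvRunsAux
    by_cases h : c = p <;> simp [h, ih]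

theorem pvL2 (ts : List String) : ∀ (t : String) (chunks : List String) (cur : String),
    (let r := ((t :: ts).dropLast).foldl pvPackStep (chunks, cur)
     r.1 ++ [r.2 ++ (t :: ts).getLastD ""]) = pvPackR chunks cur (t :: ts) := by
  induction ts with
  | nil => intro t chunks cur; simp [pvPackR]
  | cons t' rest ih =>
    intro t chunks cur
    have h := ih t' (if cur.length > 47 then chunks ++ [cur] else chunks)
      ((if cur.length > 47 then "" else cur) ++ t)
    simp only [List.dropLast_cons₂, List.foldl_cons, List.getLastD_cons, pvPackStep] at *
    exact h

theorem pvL1 (l : List Char) : ∀ (p : Char) (n : Int) (css : List String) (cs : String),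
    pvFinishA (l.foldl pvStepA (css, cs, n, some p))
      = pvPackR css cs ((pvRunsAux p n l).map (fun r => pvToken r.1 r.2)) := by
  induction l with
  | nil =>
    intro p n css cs
    simp [pvFinishA, pvRunsAux, pvPackR, pvTok_eq, pvToken_ne_empty]
  | cons c l ih =>
    intro p n css cs
    by_cases hc : c = p
    · subst hc
      simp [List.foldl_cons, pvStepA, pvRunsAux, ih]
    · have hne : ¬ (some p = some c) := fun h => hc (Option.some.inj h).symm
      rcases hm : (pvRunsAux c 1 l).map (fun r => pvToken r.1 r.2) with _ | ⟨t', rest⟩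
      · exact absurd (List.map_eq_nil_iff.mp hm) (pvRunsAux_ne_nil l c 1)
      · have h47 : (cs.length + 2 + 1 > 50) = (cs.length > 47) := by
          apply propext; omega
        simp only [List.foldl_cons, pvStepA, if_neg hne, pvRunsAux, if_neg hc, List.map_cons,
          hm, pvPackR, ih, h47, pvTok_eq]

theorem compress_split_string_spec : Claim_equal_compress_split_string := by
  unfold Claim_equal_compress_split_string Spec_compress_split_string
  intro s _
  rcases hl : (PySem.Str.lower s).toList with _ | ⟨c, rest⟩
  · simp [compress_split_string, compress_split_string_alt, hl, pvRuns]
  · have hA : compress_split_string s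
        = pvFinishA ((rest.foldl pvStepA ([], "", 1, some c))) := by
      unfold compress_split_string pvFinishA
      rw [hl]
      simp [pvStepA]
    rw [hA, pvL1]
    rcases hm : (pvRunsAux c 1 rest).map (fun r => pvToken r.1 r.2) with _ | ⟨t, ts⟩
    · exact absurd (List.map_eq_nil_iff.mp hm) (pvRunsAux_ne_nil rest c 1)
    · unfold compress_split_string_alt
      rw [hl]
      simp only [pvRuns, hm]
      rw [← pvL2]
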